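-- pv_equiv track=rewrite | github.com/matanew1/MedialRAGModelServer | app/model.py | get_ordered_keys_from_index
-- ===== SOURCE A (Python) =====
-- from typing import List, Tuple, Any
--
-- def get_ordered_keys_from_index(available_keys: List[str], start_index: int) -> List[Tuple[int, str]]:
--     if not available_keys:
--         return []
--     ordered = []
--     for i in range(len(available_keys)):
--         actual_index = (start_index + i) % len(available_keys)
--         ordered.append((actual_index, available_keys[actual_index]))
--     return ordered
-- ===== SOURCE B (Python) =====
-- def get_ordered_keys_from_index(available_keys, start_index):
--     if not available_keys:
--         return []
--     pairs = list(enumerate(available_keys))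
--     s = start_index % len(available_keys)
--     return pairs[s:] + pairs[:s]
-- ===== Notes on version B (the rewrite author's own statement) =====
-- stated objective: simpler
-- what changed: Replaces the per-element modular-indexing loop by building the enumerated list once and returning a single slice-based rotation pairs[s:] + pairs[:s] with s = start_index % len.
import Mathlib
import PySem

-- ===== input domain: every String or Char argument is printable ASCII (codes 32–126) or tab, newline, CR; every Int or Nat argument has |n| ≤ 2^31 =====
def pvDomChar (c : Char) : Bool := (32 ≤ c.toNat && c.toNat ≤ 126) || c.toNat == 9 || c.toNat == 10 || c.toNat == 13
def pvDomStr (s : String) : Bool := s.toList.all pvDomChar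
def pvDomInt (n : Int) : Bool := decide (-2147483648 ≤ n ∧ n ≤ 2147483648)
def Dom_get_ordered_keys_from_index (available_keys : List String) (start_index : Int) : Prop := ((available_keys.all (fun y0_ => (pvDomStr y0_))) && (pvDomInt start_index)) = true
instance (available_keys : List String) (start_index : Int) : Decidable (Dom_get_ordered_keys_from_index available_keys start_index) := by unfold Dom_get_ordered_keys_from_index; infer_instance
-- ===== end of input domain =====

-- ===== PORT A =====
-- Header: B builds list(enumerate(keys)) once and returns the slice rotation pairs[s:] + pairs[:s]
-- (s = start_index % len) instead of A's per-element modular-indexing loop: simpler decomposition.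
def get_ordered_keys_from_index (available_keys : List String) (start_index : Int) : List (Int × String) :=
  if available_keys = [] then []
  else
    (PySem.List.pyRange 0 available_keys.length 1).foldl
      (fun ordered i =>
        let actual_index := PySem.Int.mod (start_index + i) available_keys.length
        ordered ++ [(actual_index, PySem.List.pyGetD available_keys actual_index "")]) []

-- ===== PORT B =====
def get_ordered_keys_from_index_alt (available_keys : List String) (start_index : Int) : List (Int × String) :=
  if available_keys = [] then []
  else
    let pairs := PySem.List.enumerate available_keys 0
    let s := PySem.Int.mod start_index available_keys.length
    PySem.List.slice pairs (some s) none ++ PySem.List.slice pairs none (some s)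

-- ===== PRECONDITION & SPEC =====
def Spec_get_ordered_keys_from_index (available_keys : List String) (start_index : Int) (out : List (Int × String)) : Prop := out = get_ordered_keys_from_index_alt available_keys start_index
instance (available_keys : List String) (start_index : Int) (out : List (Int × String)) : Decidable (Spec_get_ordered_keys_from_index available_keys start_index out) := by unfold Spec_get_ordered_keys_from_index; infer_instance

-- ===== CLAIM (what is proved, stated in full; the proofs are below) =====
def Claim_equal_get_ordered_keys_from_index : Prop := ∀ (available_keys : List String) (start_index : Int), Dom_get_ordered_keys_from_index available_keys start_index → Spec_get_ordered_keys_from_index available_keys start_index (get_ordered_keys_from_index available_keys start_index)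

-- ===== LEMMAS AND PROOFS =====

theorem pv_emod_helper (N q r : Int) (h0 : 0 ≤ r) (h1 : r < N) : (N * q + r) % N = r := by
  have h : N * q + r = r + N * q := by ring
  rw [h, Int.add_mul_emod_self_left]
  exact Int.emod_eq_of_lt h0 h1

-- (start_index + i) % n computed pointwise, low part: i ∈ [0, n-k) ↦ k + i
theorem pv_mod_low (s N k i : Int) (hN : 0 < N) (hk : s % N = k) (h0 : 0 ≤ i)
    (h1 : i < N - k) : (s + i) % N = k + i := by
  have hq : s = N * (s / N) + k := by
    have := Int.mul_ediv_add_emod s N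
    omega
  have h2 : s + i = N * (s / N) + (k + i) := by omega
  rw [h2]
  exact pv_emod_helper N (s / N) (k + i) (by have := Int.emod_nonneg s (by omega : N ≠ 0); omega) (by omega)

-- high part: i ∈ [n-k, n) ↦ k + i - n
theorem pv_mod_high (s N k i : Int) (hN : 0 < N) (hk : s % N = k) (h0 : N - k ≤ i)
    (h1 : i < N) : (s + i) % N = k + i - N := by
  have hq : s = N * (s / N) + k := by
    have := Int.mul_ediv_add_emod s N
    omega
  have h2 : s + i = N * (s / N + 1) + (k + i - N) := by
    have h3 : N * (s / N + 1) = N * (s / N) + N := by ring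
    omega
  rw [h2]
  exact pv_emod_helper N (s / N + 1) (k + i - N) (by omega)
    (by have := Int.emod_lt_of_pos s hN; omega)

theorem get_ordered_keys_from_index_main (ks : List String) (s : Int) :
    get_ordered_keys_from_index ks s = get_ordered_keys_from_index_alt ks s := by
  unfold get_ordered_keys_from_index get_ordered_keys_from_index_alt
  by_cases hks : ks = []
  · simp [hks]
  · simp only [hks, reduceIte]
    have hn : 0 < ks.length := List.length_pos_iff.mpr hks
    set n : Nat := ks.length with hnn
    have hN : (0:Int) < (n : Int) := by exact_mod_cast hn
    have hmodS : PySem.Int.mod s (n : Int) = s % (n : Int) :=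
      PySem.Int.mod_eq_emod_of_pos hN
    have hS0 : 0 ≤ s % (n : Int) := Int.emod_nonneg s (by omega)
    have hS1 : s % (n : Int) < (n : Int) := Int.emod_lt_of_pos s hN
    set k : Nat := (s % (n : Int)).toNat with hkdef
    have hkI : ((k : Int)) = s % (n : Int) := by
      simp [hkdef, Int.toNat_of_nonneg hS0]
    have hkn : k ≤ n := by omega
    rw [hmodS, ← hkI,
        PySem.List.slice_from_natCast, PySem.List.slice_to_natCast,
        PySem.List.enumerate_eq_map_pyRange ks ""]
    simp only [PySem.List.len]
    rw [PySem.List.foldl_append_singleton_eq_map, List.nil_append]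
    have hsplitA : PySem.List.pyRange 0 (n : Int) 1 =
        PySem.List.pyRange 0 ((n : Int) - (k : Int)) 1 ++
        PySem.List.pyRange ((n : Int) - (k : Int)) (n : Int) 1 :=
      PySem.List.pyRange_one_append 0 ((n : Int) - (k : Int)) (n : Int) (by omega) (by omega)
    have hsplitB : PySem.List.pyRange 0 (n : Int) 1 =
        PySem.List.pyRange 0 (k : Int) 1 ++ PySem.List.pyRange (k : Int) (n : Int) 1 :=
      PySem.List.pyRange_one_append 0 (k : Int) (n : Int) (by omega) (by omega)
    have hlenB : (PySem.List.pyRange 0 (k : Int) 1).length = k := by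
      rw [PySem.List.length_pyRange_one]; simp
    conv_rhs => rw [hsplitB]
    rw [List.map_append, List.drop_left' (by simp [hlenB]), List.take_left' (by simp [hlenB])]
    conv_lhs => rw [hsplitA]
    rw [List.map_append]
    congr 1
    · -- low chunk: i ∈ [0, n-k): actual index k + i
      rw [PySem.List.pyRange_one 0, PySem.List.pyRange_one ((k : Int))]
      simp only [List.map_map, sub_zero, zero_add]
      apply List.map_congr_left
      intro t ht
      have htn : t < ((n : Int) - (k : Int)).toNat := List.mem_range.mp ht
      have hmod : PySem.Int.mod (s + (t : Int)) (n : Int) = (k : Int) + (t : Int) := by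
        rw [PySem.Int.mod_eq_emod_of_pos hN]
        exact pv_mod_low s (n : Int) (k : Int) (t : Int) hN hkI.symm (by omega) (by omega)
      simp [hmod]
    · -- high chunk: i ∈ [n-k, n): actual index k + i - n
      rw [PySem.List.pyRange_one ((n : Int) - (k : Int)), PySem.List.pyRange_one 0]
      have h12 : ((n : Int) - ((n : Int) - (k : Int))).toNat = ((k : Int) - 0).toNat := by omega
      rw [h12]
      simp only [List.map_map, sub_zero, zero_add, Int.toNat_natCast]
      apply List.map_congr_left
      intro t ht
      have htk : t < k := List.mem_range.mp ht
      have hmod : PySem.Int.mod (s + ((n : Int) - (k : Int) + (t : Int))) (n : Int) = (t : Int) := by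
        rw [PySem.Int.mod_eq_emod_of_pos hN]
        have h := pv_mod_high s (n : Int) (k : Int) ((n : Int) - (k : Int) + (t : Int)) hN hkI.symm
          (by omega) (by omega)
        rw [h]; ring
      simp [hmod]

-- ===== VERDICT (by name: the statement is the Claim_ definition above) =====
theorem get_ordered_keys_from_index_spec : Claim_equal_get_ordered_keys_from_index := by
  intro ks s _
  unfold Spec_get_ordered_keys_from_index
  exact get_ordered_keys_from_index_main ks s
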